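-- pv_equiv track=rewrite | github.com/pppmouren/CollegeProject_PSU | CMPSC132/HW/HW3.py | _isVariable
-- ===== SOURCE A (Python) =====
-- def _isVariable(word):
--     '''
--         >>> C = AdvancedCalculator()
--         >>> C._isVariable('volume')
--         True
--         >>> C._isVariable('4volume')
--         False
--         >>> C._isVariable('volume2')
--         True
--         >>> C._isVariable('vol%2')
--         False
--     '''
--     # YOUR CODE STARTS HERE
--     a = 'abcdefghijklmnopqrstuvwxyzABCDEFGHIJKLMNOPQRSTUVWXYZ1234567890'
--     if len(word) == 0:
--         return False
--     else:
--         if ord(word[0]) >= ord('0') and ord(word[0]) <= ord('9'):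
--             return False
--         else:
--             for i in word:
--                 if i not in a:
--                     return False
--             return True
-- ===== SOURCE B (Python) =====
-- import re
--
-- _VAR_RE = re.compile(r'[A-Za-z][A-Za-z0-9]*')
--
-- def _isVariable(word):
--     return bool(_VAR_RE.fullmatch(word))
-- ===== Notes on version B (the rewrite author's own statement) =====
-- stated objective: idiomatic
-- what changed: Replaces the empty-check, first-char digit test and per-character membership loop with a single compiled ASCII regex fullmatch [A-Za-z][A-Za-z0-9]*.
import Mathlib
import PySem

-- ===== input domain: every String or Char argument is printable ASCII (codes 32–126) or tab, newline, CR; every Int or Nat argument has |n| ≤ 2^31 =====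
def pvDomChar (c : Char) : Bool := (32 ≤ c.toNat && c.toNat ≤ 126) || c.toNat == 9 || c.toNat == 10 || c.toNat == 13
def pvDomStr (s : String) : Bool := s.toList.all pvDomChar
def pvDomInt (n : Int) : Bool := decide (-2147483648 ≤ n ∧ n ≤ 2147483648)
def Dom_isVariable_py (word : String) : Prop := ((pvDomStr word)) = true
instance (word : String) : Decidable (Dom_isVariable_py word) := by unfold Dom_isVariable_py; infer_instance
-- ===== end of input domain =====

-- B replaces A's empty-check, first-char digit test and per-character membership loop
-- with one ASCII regex fullmatch [A-Za-z][A-Za-z0-9]* (idiomatic; same cost).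

-- ===== PORT A =====
-- the literal alphabet string A builds
def pvAlpha : List Char :=
  "abcdefghijklmnopqrstuvwxyzABCDEFGHIJKLMNOPQRSTUVWXYZ1234567890".toList

-- the for-loop 'for i in word: if i not in a: return False' / 'return True'
def pvLoopA : List Char → Bool
  | [] => true
  | i :: rest => if !(pvAlpha.contains i) then false else pvLoopA rest

def isVariable_py (word : String) : Bool :=
  let cs := word.toList
  if cs.length == 0 then false
  else
    match cs with
    | [] => false
    | c0 :: _ =>
      if c0.toNat ≥ '0'.toNat && c0.toNat ≤ '9'.toNat then false
      else pvLoopA cs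

-- ===== PORT B =====
-- hand port of re.fullmatch(r'[A-Za-z][A-Za-z0-9]*', word): exact on this fixed
-- ASCII pattern — first char in [A-Za-z], every remaining char in [A-Za-z0-9].
def pvIsAsciiLetter (c : Char) : Bool :=
  ('A' ≤ c && c ≤ 'Z') || ('a' ≤ c && c ≤ 'z')

def pvIsAsciiAlnum (c : Char) : Bool :=
  pvIsAsciiLetter c || ('0' ≤ c && c ≤ '9')

def isVariable_py_alt (word : String) : Bool :=
  match word.toList with
  | [] => false
  | c :: rest => pvIsAsciiLetter c && rest.all pvIsAsciiAlnum

-- ===== PRECONDITION & SPEC =====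
def Spec_isVariable_py (word : String) (out : Bool) : Prop := out = isVariable_py_alt word
instance (word : String) (out : Bool) : Decidable (Spec_isVariable_py word out) := by unfold Spec_isVariable_py; infer_instance

-- ===== CLAIM (what is proved, stated in full; the proofs are below) =====
def Claim_equal_isVariable_py : Prop := ∀ (word : String), Dom_isVariable_py word → Spec_isVariable_py word (isVariable_py word)

-- ===== LEMMAS AND PROOFS =====

set_option maxRecDepth 10000 in
-- a character is in A's alphabet string iff it is an ASCII alphanumeric
theorem mem_alpha_iff (c : Char) : pvAlpha.contains c = pvIsAsciiAlnum c := by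
  by_cases h : c.toNat < 128
  · obtain ⟨n, hn, rfl⟩ : ∃ n, n < 128 ∧ c = Char.ofNat n :=
      ⟨c.toNat, h, (Char.ofNat_toNat c).symm⟩
    interval_cases n <;> decide
  · have hb : pvAlpha.all (fun y => y.toNat < 128) = true := by decide
    have hmem : c ∉ pvAlpha := fun hc =>
      h (by simpa using List.all_eq_true.mp hb c hc)
    have hl : pvAlpha.contains c = false := by simpa using hmem
    have hle : ∀ d : Char, d.toNat < 128 → ¬ c ≤ d := by
      intro d hd hcd
      exact h (Nat.lt_of_le_of_lt (UInt32.le_iff_toNat_le.mp (Char.le_def.mp hcd)) hd)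
    simp [hmem, pvIsAsciiAlnum, pvIsAsciiLetter, hle _ (by decide : ('Z':Char).toNat < 128),
      hle _ (by decide : ('z':Char).toNat < 128), hle _ (by decide : ('9':Char).toNat < 128)]

theorem loopA_eq_all (cs : List Char) : pvLoopA cs = cs.all (fun c => pvAlpha.contains c) := by
  induction cs with
  | nil => rfl
  | cons c rest ih =>
    simp only [pvLoopA, List.all_cons, ih]
    cases pvAlpha.contains c <;> simp
    

set_option maxRecDepth 10000 in
theorem head_eq (c : Char) :
    (if c.toNat ≥ '0'.toNat && c.toNat ≤ '9'.toNat then false else pvIsAsciiAlnum c)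
      = pvIsAsciiLetter c := by
  by_cases h : c.toNat < 128
  · obtain ⟨n, hn, rfl⟩ : ∃ n, n < 128 ∧ c = Char.ofNat n :=
      ⟨c.toNat, h, (Char.ofNat_toNat c).symm⟩
    interval_cases n <;> decide
  · have hle : ∀ d : Char, d.toNat < 128 → ¬ c ≤ d := by
      intro d hd' hcd
      exact h (Nat.lt_of_le_of_lt (UInt32.le_iff_toNat_le.mp (Char.le_def.mp hcd)) hd')
    simp [pvIsAsciiAlnum, pvIsAsciiLetter,
      hle _ (by decide : ('Z':Char).toNat < 128),
      hle _ (by decide : ('z':Char).toNat < 128),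
      hle _ (by decide : ('9':Char).toNat < 128)]

-- ===== VERDICT (by name: the statement is the Claim_ definition above) =====
theorem isVariable_py_spec : Claim_equal_isVariable_py := by
  intro word _
  unfold Spec_isVariable_py isVariable_py isVariable_py_alt
  cases hcs : word.toList with
  | nil => simp
  | cons c rest =>
    simp only [List.length_cons, loopA_eq_all]
    by_cases hd : (c.toNat ≥ '0'.toNat && c.toNat ≤ '9'.toNat) = true
    · have hlf : pvIsAsciiLetter c = false := by
        have hhd := head_eq c
        rw [if_pos hd] at hhd
        exact hhd.symm
      rw [if_pos hd, hlf, Bool.false_and]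
      simp
    · have hhd := head_eq c
      rw [if_neg hd] at hhd
      rw [if_neg hd]
      simp only [List.all_cons, mem_alpha_iff, hhd]
      simp
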